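-- pv_equiv track=rewrite | github.com/gopshyam/concert-tracker | data_cleaner.py | combine_concert_lines
-- ===== SOURCE A (Python) =====
-- def combine_concert_lines(lines):
--     """Combine split concert lines into single lines."""
--     concerts = []
--     current_concert = []
--
--     for line in lines:
--         line = line.strip()
--         if not line:
--             continue
--
--         # If line starts with a month, it's a new concert
--         if line.lower().startswith(('jan', 'feb', 'mar', 'apr', 'may', 'jun', 'jul', 'aug', 'sep', 'oct', 'nov', 'dec')):
--             # Process previous concert if exists
--             if current_concert:
--                 concerts.append(' '.join(current_concert))
--             current_concert = [line]
--         else: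
--             # Add line to current concert
--             current_concert.append(line)
--
--     # Process the last concert
--     if current_concert:
--         concerts.append(' '.join(current_concert))
--
--     return concerts
-- ===== SOURCE B (Python) =====
-- MONTHS = ('jan', 'feb', 'mar', 'apr', 'may', 'jun',
--           'jul', 'aug', 'sep', 'oct', 'nov', 'dec')
--
--
-- def _is_month(line):
--     return line.lower().startswith(MONTHS)
--
--
-- def combine_concert_lines(lines):
--     """Combine split concert lines into single lines."""
--     filtered = [s for s in (l.strip() for l in lines) if s]
--     out = []
--     i = 0
--     n = len(filtered)
--     while i < n:
--         j = i + 1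
--         while j < n and not _is_month(filtered[j]):
--             j += 1
--         out.append(' '.join(filtered[i:j]))
--         i = j
--     return out
-- ===== Notes on version B (the rewrite author's own statement) =====
-- stated objective: alternative
-- what changed: Replaced A's stateful accumulator fold (current-concert buffer flushed on each month marker and at the end) by a filter-first two-pointer pass: strip/drop empties once, then for each group start scan forward to the next month marker and join the slice.
import Mathlib
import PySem

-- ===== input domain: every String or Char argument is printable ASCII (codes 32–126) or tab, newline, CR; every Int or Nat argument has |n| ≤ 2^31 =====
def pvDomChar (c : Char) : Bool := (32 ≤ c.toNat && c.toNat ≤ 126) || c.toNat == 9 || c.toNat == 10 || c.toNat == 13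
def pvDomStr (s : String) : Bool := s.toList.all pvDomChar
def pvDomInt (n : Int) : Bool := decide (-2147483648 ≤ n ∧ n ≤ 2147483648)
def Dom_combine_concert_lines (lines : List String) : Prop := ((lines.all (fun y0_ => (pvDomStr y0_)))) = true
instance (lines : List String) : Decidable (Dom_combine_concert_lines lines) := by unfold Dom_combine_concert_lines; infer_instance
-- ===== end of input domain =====

-- B replaces A's stateful accumulator with a filter-then-scan-to-next-marker pass; alternative decomposition, same cost.

-- shared helper: line.lower().startswith(('jan', …, 'dec'))  — both Pythons test the same tuple
def pvIsMonth (s : String) : Bool :=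
  let t := PySem.Str.lower s
  ["jan", "feb", "mar", "apr", "may", "jun",
   "jul", "aug", "sep", "oct", "nov", "dec"].any (fun m => PySem.Str.startswith t m)

-- ===== PORT A =====
-- one iteration of A's for-loop over the state (concerts, current_concert)
def combAStep (st : List String × List String) (line : String) : List String × List String :=
  let l := PySem.Str.strip line
  if l == "" then st
  else if pvIsMonth l then
    ((if st.2.isEmpty then st.1 else st.1 ++ [PySem.Str.join " " st.2]), [l])
  else (st.1, st.2 ++ [l])

def combine_concert_lines (lines : List String) : List String :=
  let st := lines.foldl combAStep ([], [])
  if st.2.isEmpty then st.1 else st.1 ++ [PySem.Str.join " " st.2]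

-- ===== PORT B =====
-- Source B's outer while-loop over index i is transcribed as recursion on the suffix filtered[i:];
-- the inner scan for j and the slice filtered[i:j] are exactly takeWhile/dropWhile of "not month"
-- on that suffix (the loop never revisits earlier elements), so this is step-for-step exact.
def combGroups : List String → List String
  | [] => []
  | x :: xs =>
      PySem.Str.join " " (x :: xs.takeWhile (fun l => !pvIsMonth l))
        :: combGroups (xs.dropWhile (fun l => !pvIsMonth l))
  termination_by l => l.length
  decreasing_by
    exact Nat.lt_succ_of_le (List.length_dropWhile_le _ _)

def combine_concert_lines_alt (lines : List String) : List String :=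
  let filtered := (lines.map PySem.Str.strip).filter (fun s => s != "")
  combGroups filtered

-- ===== PRECONDITION & SPEC =====
def Spec_combine_concert_lines (lines : List String) (out : List String) : Prop := out = combine_concert_lines_alt lines
instance (lines : List String) (out : List String) : Decidable (Spec_combine_concert_lines lines out) := by unfold Spec_combine_concert_lines; infer_instance

-- ===== CLAIM (what is proved, stated in full; the proofs are below) =====
def Claim_equal_combine_concert_lines : Prop := ∀ (lines : List String), Dom_combine_concert_lines lines → Spec_combine_concert_lines lines (combine_concert_lines lines)

-- ===== LEMMAS AND PROOFS =====

-- A's step restricted to the already-stripped nonempty lines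
def combStep2 (st : List String × List String) (l : String) : List String × List String :=
  if pvIsMonth l then
    ((if st.2.isEmpty then st.1 else st.1 ++ [PySem.Str.join " " st.2]), [l])
  else (st.1, st.2 ++ [l])

def combFinish (st : List String × List String) : List String :=
  if st.2.isEmpty then st.1 else st.1 ++ [PySem.Str.join " " st.2]

-- A's fold over raw lines equals the simplified fold over the stripped, nonempty lines
theorem fold_filter (lines : List String) :
    ∀ st, lines.foldl combAStep st
      = ((lines.map PySem.Str.strip).filter (fun s => s != "")).foldl combStep2 st := by
  induction lines with
  | nil => intro st; rfl
  | cons a as ih =>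
      intro st
      simp only [List.foldl_cons, List.map_cons, List.filter_cons]
      by_cases h : PySem.Str.strip a = ""
      · have ha : combAStep st a = st := by simp [combAStep, h]
        simp [h, ha, ih]
      · have ha : combAStep st a = combStep2 st (PySem.Str.strip a) := by
          simp [combAStep, combStep2, h]
        simp only [bne_iff_ne, ne_eq, h, not_false_eq_true, if_pos, List.foldl_cons, ha]
        exact ih _

-- the accumulated concerts list only grows: factor it out of the fold
theorem finish_acc (xs : List String) :
    ∀ acc cur, combFinish (xs.foldl combStep2 (acc, cur))
      = acc ++ combFinish (xs.foldl combStep2 ([], cur)) := by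
  induction xs with
  | nil =>
      intro acc cur
      by_cases h : cur.isEmpty <;> simp [combFinish, h]
  | cons x xs ih =>
      intro acc cur
      by_cases hm : pvIsMonth x
      · by_cases h : cur.isEmpty
        · have e1 : combStep2 (acc, cur) x = (acc, [x]) := by simp [combStep2, hm, h]
          have e2 : combStep2 ([], cur) x = ([], [x]) := by simp [combStep2, hm, h]
          rw [List.foldl_cons, List.foldl_cons, e1, e2]
          exact ih acc [x]
        · have e1 : combStep2 (acc, cur) x
              = (acc ++ [PySem.Str.join " " cur], [x]) := by simp [combStep2, hm, h]
          have e2 : combStep2 (([] : List String), cur) x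
              = ([PySem.Str.join " " cur], [x]) := by simp [combStep2, hm, h]
          rw [List.foldl_cons, List.foldl_cons, e1, e2,
            ih (acc ++ [PySem.Str.join " " cur]) [x], ih [PySem.Str.join " " cur] [x]]
          simp
      · have e1 : ∀ a : List String, combStep2 (a, cur) x = (a, cur ++ [x]) := by
          intro a; simp [combStep2, hm]
        rw [List.foldl_cons, List.foldl_cons, e1, e1]
        exact ih acc (cur ++ [x])

-- with a nonempty current buffer, the rest of A's fold produces exactly one group per span
theorem fold_groups (xs : List String) :
    ∀ cur, cur ≠ [] →
      combFinish (xs.foldl combStep2 ([], cur))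
        = PySem.Str.join " " (cur ++ xs.takeWhile (fun l => !pvIsMonth l))
            :: combGroups (xs.dropWhile (fun l => !pvIsMonth l)) := by
  induction xs with
  | nil =>
      intro cur hcur
      simp [combFinish, List.isEmpty_iff, hcur, combGroups]
  | cons x xs ih =>
      intro cur hcur
      by_cases hm : pvIsMonth x
      · simp only [List.foldl_cons, combStep2, hm, if_true, List.isEmpty_iff, hcur, reduceIte]
        rw [finish_acc, ih [x] (by simp)]
        simp [hm, combGroups]
      · simp only [List.foldl_cons, combStep2, hm, Bool.false_eq_true, reduceIte]
        rw [ih (cur ++ [x]) (by simp)]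
        simp [hm]

-- ===== VERDICT (by name: the statement is the Claim_ definition above) =====
theorem combine_concert_lines_spec : Claim_equal_combine_concert_lines := by
  intro lines _
  show combFinish (lines.foldl combAStep ([], [])) = combine_concert_lines_alt lines
  rw [fold_filter lines ([], [])]
  show _ = combGroups ((lines.map PySem.Str.strip).filter (fun s => s != ""))
  generalize (lines.map PySem.Str.strip).filter (fun s => s != "") = fs
  cases fs with
  | nil => simp [combFinish, combGroups]
  | cons x xs =>
      have hstep : combStep2 ([], []) x = ([], [x]) := by
        by_cases hm : pvIsMonth x <;> simp [combStep2, hm]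
      rw [List.foldl_cons, hstep, fold_groups xs [x] (by simp), combGroups]
      simp
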